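/- GENERATED by c/gen_decode.py: decode facts of the image, one per distinct instruction byte string. -/
import UserX.DecodeImage

#decode_all ProgX.Base.Dec
  "4088b70000c000"  -- mov BYTE PTR [rdi+0xc00000],sil
  "4829f8"  -- sub rax,rdi
  "4889042500008000"  -- mov QWORD PTR ds:0x800000,rax
  "4889fb"  -- mov rbx,rdi
  "48c1e834"  -- shr rax,0x34
  "498d2c1c"  -- lea rbp,[r12+rbx*1]
  "4d89f0"  -- mov r8,r14
  "660f570510db0300"  -- xorpd xmm0,XMMWORD PTR [rip+0x3db10]
  "7414"  -- je 103e30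
  "7718"  -- ja 104334
  "81ffff030000"  -- cmp edi,0x3ff
  "bbff030000"  -- mov ebx,0x3ff
  "e858d0ffff"  -- call 100c00
  "e8d0f9ffff"  -- call 101300
  "eb1b"  -- jmp 100d83
  "f20f100d41d50300"  -- movsd xmm1,QWORD PTR [rip+0x3d541]
  "f20f58d0"  -- addsd xmm2,xmm0
  "f20f5cc0"  -- subsd xmm0,xmm0
  "f20f5e1de0e10300"  -- divsd xmm3,QWORD PTR [rip+0x3e1e0]
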